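-- pv_equiv track=rewrite | github.com/alleyooprod/research-taxonomy | core/url_resolver.py | _extract_company_url_from_links
-- ===== SOURCE A (Python) =====
-- AGGREGATOR_DOMAINS = ['linktr.ee', 'linkin.bio', 'beacons.ai', 'msha.ke']
--
-- SKIP_DOMAINS = [
--     'instagram.com', 'twitter.com', 'x.com', 'facebook.com',
--     'linkedin.com', 'tiktok.com', 'youtube.com', 'threads.net',
--     'pinterest.com', 'snapchat.com', 'whatsapp.com',
--     'spotify.com', 'apple.com/music', 'music.amazon',
--     'paypal.me', 'venmo.com', 'cash.app', 'ko-fi.com',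
--     'patreon.com', 'gofundme.com', 'buymeacoffee.com',
-- ]
--
-- def _is_aggregator_url(url):
--     """Check if a URL belongs to a known aggregator domain."""
--     return any(domain in url.lower() for domain in AGGREGATOR_DOMAINS)
--
-- def _is_shortener_url(url):
--     """Check if a URL belongs to a known shortener domain."""
--     shortener_domains = ['bit.ly', 'tinyurl.com', 't.co', 'heylink.me']
--     return any(domain in url.lower() for domain in shortener_domains)
--
-- def _extract_company_url_from_links(links):
--     """Given a list of hrefs, find the most likely company URL.
--
--     Skips social/payment domains. If an aggregator or shortener link is found,
--     it's kept as a secondary candidate to be resolved further.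
--     """
--     candidates = []
--     aggregator_candidates = []
--     for href in links:
--         if not href or not href.startswith('http'):
--             continue
--         if any(skip in href.lower() for skip in SKIP_DOMAINS):
--             continue
--         if _is_aggregator_url(href) or _is_shortener_url(href):
--             aggregator_candidates.append(href)
--             continue
--         candidates.append(href)
--     # Prefer direct company URLs; fall back to aggregator links for recursive resolution
--     if candidates:
--         return candidates[0]
--     if aggregator_candidates:
--         return aggregator_candidates[0]
--     return None
-- ===== SOURCE B (Python) =====
-- AGGREGATOR_DOMAINS = ['linktr.ee', 'linkin.bio', 'beacons.ai', 'msha.ke']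
--
-- SKIP_DOMAINS = [
--     'instagram.com', 'twitter.com', 'x.com', 'facebook.com',
--     'linkedin.com', 'tiktok.com', 'youtube.com', 'threads.net',
--     'pinterest.com', 'snapchat.com', 'whatsapp.com',
--     'spotify.com', 'apple.com/music', 'music.amazon',
--     'paypal.me', 'venmo.com', 'cash.app', 'ko-fi.com',
--     'patreon.com', 'gofundme.com', 'buymeacoffee.com',
-- ]
--
-- def _is_aggregator_url(url):
--     return any(domain in url.lower() for domain in AGGREGATOR_DOMAINS)
--
-- def _is_shortener_url(url):
--     shortener_domains = ['bit.ly', 'tinyurl.com', 't.co', 'heylink.me']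
--     return any(domain in url.lower() for domain in shortener_domains)
--
-- def _extract_company_url_from_links(links):
--     filtered = [h for h in links
--                 if h and h.startswith('http')
--                 and not any(skip in h.lower() for skip in SKIP_DOMAINS)]
--     direct = next((h for h in filtered
--                    if not _is_aggregator_url(h) and not _is_shortener_url(h)), None)
--     if direct is not None:
--         return direct
--     return next((h for h in filtered
--                  if _is_aggregator_url(h) or _is_shortener_url(h)), None)
-- ===== Notes on version B (the rewrite author's own statement) =====
-- stated objective: idiomatic
-- what changed: A's single accumulating loop building two candidate lists is replaced by one filter pass followed by two short-circuiting first-match scans (direct URLs first, then aggregator/shortener fallback).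
import Mathlib
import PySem

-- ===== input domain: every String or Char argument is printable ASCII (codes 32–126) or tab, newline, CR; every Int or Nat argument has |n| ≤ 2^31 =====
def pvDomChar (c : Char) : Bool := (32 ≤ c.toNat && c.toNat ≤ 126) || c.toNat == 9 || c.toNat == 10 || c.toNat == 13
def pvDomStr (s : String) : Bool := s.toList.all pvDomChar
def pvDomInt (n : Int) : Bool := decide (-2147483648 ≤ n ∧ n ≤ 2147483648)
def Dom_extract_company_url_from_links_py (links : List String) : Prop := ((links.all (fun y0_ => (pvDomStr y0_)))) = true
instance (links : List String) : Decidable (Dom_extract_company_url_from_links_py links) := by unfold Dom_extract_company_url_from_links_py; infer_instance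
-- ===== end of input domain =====

set_option maxRecDepth 4000


-- B replaces A's single accumulating loop (two candidate lists) by a filter pass plus two
-- short-circuiting first-match scans; same first-match order and result (objective: idiomatic).

-- shared module constants / predicates (present in both Python files)
def pvAggDomains : List String := ["linktr.ee", "linkin.bio", "beacons.ai", "msha.ke"]

def pvSkipDomains : List String :=
  ["instagram.com", "twitter.com", "x.com", "facebook.com",
   "linkedin.com", "tiktok.com", "youtube.com", "threads.net",
   "pinterest.com", "snapchat.com", "whatsapp.com",
   "spotify.com", "apple.com/music", "music.amazon",
   "paypal.me", "venmo.com", "cash.app", "ko-fi.com",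
   "patreon.com", "gofundme.com", "buymeacoffee.com"]

def pvShortenerDomains : List String := ["bit.ly", "tinyurl.com", "t.co", "heylink.me"]

def isAggregatorUrl (url : String) : Bool :=
  pvAggDomains.any (fun d => PySem.Str.isIn d (PySem.Str.lower url))

def isShortenerUrl (url : String) : Bool :=
  pvShortenerDomains.any (fun d => PySem.Str.isIn d (PySem.Str.lower url))

def skipAny (href : String) : Bool :=
  pvSkipDomains.any (fun s => PySem.Str.isIn s (PySem.Str.lower href))

-- ===== PORT A =====
-- A's loop body: one step of the accumulation over (candidates, aggregator_candidates)
def stepA (st : List String × List String) (href : String) : List String × List String :=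
  if href == "" || !(PySem.Str.startswith href "http") then st
  else if skipAny href then st
  else if isAggregatorUrl href || isShortenerUrl href then (st.1, st.2 ++ [href])
  else (st.1 ++ [href], st.2)

def extract_company_url_from_links_py (links : List String) : Option String :=
  let st := links.foldl stepA ([], [])
  match st.1 with
  | c :: _ => some c
  | [] =>
    match st.2 with
    | a :: _ => some a
    | [] => none

-- ===== PORT B =====
-- Source B's list-comprehension condition
def goodB (h : String) : Bool :=
  h != "" && PySem.Str.startswith h "http" && !(skipAny h)

def extract_company_url_from_links_py_alt (links : List String) : Option String :=
  let filtered := links.filter goodB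
  match filtered.find? (fun h => !(isAggregatorUrl h) && !(isShortenerUrl h)) with
  | some d => some d
  | none => filtered.find? (fun h => isAggregatorUrl h || isShortenerUrl h)

-- ===== PRECONDITION & SPEC =====
def Spec_extract_company_url_from_links_py (links : List String) (out : Option String) : Prop := out = extract_company_url_from_links_py_alt links
instance (links : List String) (out : Option String) : Decidable (Spec_extract_company_url_from_links_py links out) := by unfold Spec_extract_company_url_from_links_py; infer_instance

-- ===== CLAIM (what is proved, stated in full; the proofs are below) =====
def Claim_equal_extract_company_url_from_links_py : Prop := ∀ (links : List String), Dom_extract_company_url_from_links_py links → Spec_extract_company_url_from_links_py links (extract_company_url_from_links_py links)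

-- ===== LEMMAS AND PROOFS =====

-- find? is the head of the filtered list
lemma find?_eq_head?_filter (p : String → Bool) (l : List String) :
    l.find? p = (l.filter p).head? := by
  induction l with
  | nil => rfl
  | cons h t ih =>
    cases hp : p h with
    | true =>
      simp only [List.find?_cons, List.filter_cons, hp, if_true, List.head?_cons]
    | false =>
      simp only [List.find?_cons, List.filter_cons, hp, Bool.false_eq_true, if_false]
      exact ih

-- loop invariant: A's fold appends exactly B's two filtered sublists to the accumulators
lemma loop_spec (l : List String) : ∀ (c a : List String),
    l.foldl stepA (c, a) =
      (c ++ (l.filter goodB).filter (fun h => !(isAggregatorUrl h) && !(isShortenerUrl h)),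
       a ++ (l.filter goodB).filter (fun h => isAggregatorUrl h || isShortenerUrl h)) := by
  induction l with
  | nil => intro c a; simp only [List.foldl_nil, List.filter_nil, List.append_nil]
  | cons h t ih =>
    intro c a
    rw [List.foldl_cons]
    cases hg : goodB h with
    | false =>
      have hs : stepA (c, a) h = (c, a) := by
        cases h1 : (h == "" || !(PySem.Str.startswith h "http")) with
        | true => simp only [stepA, h1, if_true]
        | false =>
          cases h2 : skipAny h with
          | true => simp only [stepA, h1, h2, Bool.false_eq_true, if_false, if_true]
          | false =>
            exfalso
            rw [Bool.or_eq_false_iff] at h1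
            simp only [goodB, h2, Bool.not_false, Bool.and_true, Bool.and_eq_false_imp] at hg
            have hne : h ≠ "" := by
              intro he; rw [he] at h1; simp at h1
            have hst : PySem.Str.startswith h "http" = true := by
              have := h1.2; simpa using this
            exact absurd (hg (by simp [bne_iff_ne, hne])) (by simp only [hst]; simp)
      rw [hs, ih]
      simp only [List.filter_cons, hg, Bool.false_eq_true, if_false]
    | true =>
      have hg' := hg
      simp only [goodB, Bool.and_eq_true, bne_iff_ne, Bool.not_eq_true'] at hg'
      have h1 : (h == "" || !(PySem.Str.startswith h "http")) = false := by
        rw [Bool.or_eq_false_iff]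
        exact ⟨by simpa using hg'.1.1, by rw [hg'.1.2]; rfl⟩
      have h2 : skipAny h = false := hg'.2
      cases hag : (isAggregatorUrl h || isShortenerUrl h) with
      | true =>
        have hnd : (!(isAggregatorUrl h) && !(isShortenerUrl h)) = false := by
          rcases Bool.or_eq_true_iff.mp hag with ha | ha <;> simp [ha]
        have hs : stepA (c, a) h = (c, a ++ [h]) := by
          simp only [stepA, h1, h2, hag, Bool.false_eq_true, if_false, if_true]
        rw [hs, ih]
        simp only [List.filter_cons, hg, hag, hnd, Bool.false_eq_true, if_false, if_true,
          List.append_assoc, List.singleton_append]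
      | false =>
        have hnd : (!(isAggregatorUrl h) && !(isShortenerUrl h)) = true := by
          rw [Bool.or_eq_false_iff] at hag
          simp [hag.1, hag.2]
        have hs : stepA (c, a) h = (c ++ [h], a) := by
          simp only [stepA, h1, h2, hag, Bool.false_eq_true, if_false]
        rw [hs, ih]
        simp only [List.filter_cons, hg, hag, hnd, Bool.false_eq_true, if_false, if_true,
          List.append_assoc, List.singleton_append]

-- ===== VERDICT (by name: the statement is the Claim_ definition above) =====
theorem extract_company_url_from_links_py_spec : Claim_equal_extract_company_url_from_links_py := by
  intro links _
  unfold Spec_extract_company_url_from_links_py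
  unfold extract_company_url_from_links_py extract_company_url_from_links_py_alt
  rw [loop_spec]
  simp only [List.nil_append, find?_eq_head?_filter]
  cases hd : (links.filter goodB).filter (fun h => !(isAggregatorUrl h) && !(isShortenerUrl h)) with
  | cons c cs => simp only [List.head?]
  | nil =>
    cases ha : (links.filter goodB).filter (fun h => isAggregatorUrl h || isShortenerUrl h) with
    | cons a as => simp only [List.head?]
    | nil => simp only [List.head?]
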